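-- pv_equiv track=rewrite | github.com/malonge/RagTag | ragtag_correct.py | clean_breaks
-- ===== SOURCE A (Python) =====
-- def clean_breaks(val_breaks, d):
--     """ Merge breakpoints that are within d bp of each other. """
--     breaks = sorted(list(set(val_breaks)))
--     i, j = 0, 1
--     while j < len(breaks):
--         if breaks[j] - breaks[i] < d:
--             breaks.pop(j)
--         else:
--             i += 1
--             j += 1
--     return breaks
-- ===== SOURCE B (Python) =====
-- def clean_breaks(val_breaks, d):
--     """ Merge breakpoints that are within d bp of each other (single forward pass). """
--     out = []
--     for x in sorted(set(val_breaks)):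
--         if not out or x - out[-1] >= d:
--             out.append(x)
--     return out
-- ===== Notes on version B (the rewrite author's own statement) =====
-- stated objective: faster
-- what changed: Replaces the index-juggling while loop that pops kept-out elements from the middle of the list with a single forward pass that appends an element only when it is at least d beyond the last kept one.
import Mathlib
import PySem

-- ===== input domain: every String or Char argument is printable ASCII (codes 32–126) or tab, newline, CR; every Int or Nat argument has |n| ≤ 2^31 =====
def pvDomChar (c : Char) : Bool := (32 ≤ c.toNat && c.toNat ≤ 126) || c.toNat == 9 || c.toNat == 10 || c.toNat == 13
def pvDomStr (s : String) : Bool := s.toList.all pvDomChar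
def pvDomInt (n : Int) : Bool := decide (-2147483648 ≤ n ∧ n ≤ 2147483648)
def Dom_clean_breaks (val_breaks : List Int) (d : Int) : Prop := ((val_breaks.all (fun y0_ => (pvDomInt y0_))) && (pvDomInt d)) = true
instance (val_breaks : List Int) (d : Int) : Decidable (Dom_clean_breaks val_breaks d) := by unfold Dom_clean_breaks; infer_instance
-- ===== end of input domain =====

-- B replaces A's pop-from-the-middle while loop by one forward pass keeping x iff x ≥ last kept + d (faster only if a timing run confirms; same return value, no mutation visible to callers).
-- ===== PORT A =====
-- while j < len(breaks): pop(j) / advance.  breaks[i], breaks[j] are read only when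
-- provably in range (j < len, and i < j throughout A's run), so getD is exact there;
-- breaks.pop(j) with 0 ≤ j < len is exactly List.eraseIdx.
def cbLoop (breaks : List Int) (i j : Nat) (d : Int) : List Int :=
  if h : j < breaks.length then
    if breaks.getD j 0 - breaks.getD i 0 < d then
      cbLoop (breaks.eraseIdx j) i j d
    else
      cbLoop breaks (i + 1) (j + 1) d
  else breaks
termination_by (breaks.length - i) + (breaks.length - j)
decreasing_by
  · simp only [List.length_eraseIdx, if_pos h]; omega
  · omega

def clean_breaks (val_breaks : List Int) (d : Int) : List Int :=
  cbLoop (PySem.List.sorted (PySem.Set.ofList val_breaks) (fun x => x) false) 0 1 d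

-- ===== PORT B =====
-- loop body of Source B: if not out or x - out[-1] >= d: out.append(x)
def cbStep (d : Int) (out : List Int) (x : Int) : List Int :=
  if out = [] ∨ d ≤ x - PySem.List.pyGetD out (-1) 0 then out ++ [x] else out

def clean_breaks_alt (val_breaks : List Int) (d : Int) : List Int :=
  (PySem.List.sorted (PySem.Set.ofList val_breaks) (fun x => x) false).foldl (cbStep d) []

-- ===== PRECONDITION & SPEC =====
def Spec_clean_breaks (val_breaks : List Int) (d : Int) (out : List Int) : Prop := out = clean_breaks_alt val_breaks d
instance (val_breaks : List Int) (d : Int) (out : List Int) : Decidable (Spec_clean_breaks val_breaks d out) := by unfold Spec_clean_breaks; infer_instance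

-- ===== CLAIM (what is proved, stated in full; the proofs are below) =====
def Claim_equal_clean_breaks : Prop := ∀ (val_breaks : List Int) (d : Int), Dom_clean_breaks val_breaks d → Spec_clean_breaks val_breaks d (clean_breaks val_breaks d)

-- ===== LEMMAS AND PROOFS =====

-- ===== VERDICT (by name: the statement is the Claim_ definition above) =====
-- the common merge skeleton both loops compute after the first element
def cbGo (d cur : Int) : List Int → List Int
  | [] => []
  | y :: ys => if y - cur < d then cbGo d cur ys else y :: cbGo d y ys

theorem cbLoop_eq_go (d : Int) (rest kept : List Int) (cur : Int) :
    cbLoop (kept ++ cur :: rest) kept.length (kept.length + 1) d = kept ++ cur :: cbGo d cur rest := by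
  induction rest generalizing kept cur with
  | nil => unfold cbLoop; simp [cbGo]
  | cons y ys ih =>
    unfold cbLoop
    have hlen : kept.length + 1 < (kept ++ cur :: y :: ys).length := by simp
    have hi : (kept ++ cur :: y :: ys).getD kept.length 0 = cur := by
      simp [List.getD_eq_getElem?_getD]
    have hj : (kept ++ cur :: y :: ys).getD (kept.length + 1) 0 = y := by
      simp [List.getD_eq_getElem?_getD]
    rw [dif_pos hlen, hi, hj]
    by_cases hc : y - cur < d
    · rw [if_pos hc]
      have he : (kept ++ cur :: y :: ys).eraseIdx (kept.length + 1) = kept ++ cur :: ys := by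
        rw [List.eraseIdx_append_of_length_le (by simp)]
        simp
      rw [he, ih kept cur]
      simp [cbGo, hc]
    · rw [if_neg hc]
      have : kept ++ cur :: y :: ys = (kept ++ [cur]) ++ y :: ys := by simp
      rw [this]
      have hl : kept.length + 1 = (kept ++ [cur]).length := by simp
      rw [hl, ih (kept ++ [cur]) y]
      simp [cbGo, hc]

theorem cbFold_eq_go (d : Int) (l pre : List Int) (cur : Int) :
    (l.foldl (cbStep d) (pre ++ [cur])) = pre ++ cur :: cbGo d cur l := by
  induction l generalizing pre cur with
  | nil => simp [cbGo]
  | cons y ys ih =>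
    simp only [List.foldl_cons]
    by_cases hc : y - cur < d
    · have : cbStep d (pre ++ [cur]) y = pre ++ [cur] := by
        simp [cbStep, PySem.List.pyGetD_neg_one_append_singleton]
        omega
      rw [this, ih pre cur]
      simp [cbGo, hc]
    · have : cbStep d (pre ++ [cur]) y = (pre ++ [cur]) ++ [y] := by
        simp [cbStep, PySem.List.pyGetD_neg_one_append_singleton]
        omega
      rw [this, ih (pre ++ [cur]) y]
      simp [cbGo, hc]

theorem clean_breaks_spec : Claim_equal_clean_breaks := by
  intro val_breaks d _
  unfold Spec_clean_breaks clean_breaks clean_breaks_alt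
  cases hs : PySem.List.sorted (PySem.Set.ofList val_breaks) (fun x => x) false with
  | nil => unfold cbLoop; simp
  | cons c rest =>
    have hA : cbLoop (c :: rest) 0 1 d = c :: cbGo d c rest := cbLoop_eq_go d rest [] c
    have hB0 : cbStep d [] c = [c] := by simp [cbStep]
    have hB : (c :: rest).foldl (cbStep d) [] = c :: cbGo d c rest := by
      simpa [hB0] using cbFold_eq_go d rest [] c
    rw [hA, hB]
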